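-- pv_equiv track=rewrite | github.com/Jason020310/112cp1 | w3/P03-112504505.py | check
-- ===== SOURCE A (Python) =====
-- money_number = ["21981893", "39597522", "09505831","54219897", "17469638" ]
--
-- def check(input):
--     #一個一個對普獎號碼
--     for i in range(2, 5):
--         #從前面開始切割一個一個比對
--         for j in range(6):
--             #如果後幾個數字跟普獎號碼一樣
--             if (money_number[i][j:] == input[j:]):
--                 if j == 0:
--                     return 200000
--                 elif j == 1:
--                     return 40000
--                 elif j == 2:
--                     return 10000
--                 elif j == 3:
--                     return 4000
--                 elif j == 4:
--                     return 1000
--                 elif j == 5: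
--                     return 200
--     return 0
-- ===== SOURCE B (Python) =====
-- money_number = ["21981893", "39597522", "09505831", "54219897", "17469638"]
--
-- _PRIZE = {3: 200, 4: 1000, 5: 4000, 6: 10000, 7: 40000, 8: 200000}
--
--
-- def _suffix_len(a, b):
--     """Length of the longest common suffix of a and b."""
--     n = 0
--     for x, y in zip(reversed(a), reversed(b)):
--         if x != y:
--             break
--         n += 1
--     return n
--
--
-- def check(input):
--     if len(input) != 8:
--         return 0
--     for num in money_number[2:5]:
--         n = _suffix_len(num, input)
--         if n >= 3:
--             return _PRIZE[n]
--     return 0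
-- ===== Notes on version B (the rewrite author's own statement) =====
-- stated objective: simpler
-- what changed: Replaces A's nested loops comparing six slice pairs per number with one backwards longest-common-suffix scan per number and a prize table keyed by the suffix length, behind a single len==8 guard.
import Mathlib
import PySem

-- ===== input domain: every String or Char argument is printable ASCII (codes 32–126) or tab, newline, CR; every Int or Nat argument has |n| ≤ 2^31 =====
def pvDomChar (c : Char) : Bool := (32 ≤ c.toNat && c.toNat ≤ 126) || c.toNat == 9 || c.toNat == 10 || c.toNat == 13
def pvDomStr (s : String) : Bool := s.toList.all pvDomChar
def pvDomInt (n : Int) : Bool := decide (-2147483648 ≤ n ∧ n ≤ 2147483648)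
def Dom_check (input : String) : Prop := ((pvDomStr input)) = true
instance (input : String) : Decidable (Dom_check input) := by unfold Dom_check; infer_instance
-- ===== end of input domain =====

-- B rewrites A's slice-by-slice comparison as one longest-common-suffix scan per number plus a prize table (objective: simpler).

-- ===== PORT A =====
def money_number : List String := ["21981893", "39597522", "09505831", "54219897", "17469638"]

-- inner 'for j in range(6)' loop with its early returns (none = fell through)
def check_loopJ (m input : String) : List Int → Option Int
  | [] => none
  | j :: js =>
    if PySem.Str.slice m (some j) none = PySem.Str.slice input (some j) none then
      if j = 0 then some 200000
      else if j = 1 then some 40000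
      else if j = 2 then some 10000
      else if j = 3 then some 4000
      else if j = 4 then some 1000
      else if j = 5 then some 200
      else check_loopJ m input js
    else check_loopJ m input js

-- outer 'for i in range(2, 5)' loop
def check_loopI (input : String) : List Int → Option Int
  | [] => none
  | i :: is =>
    match check_loopJ (PySem.List.pyGetD money_number i "") input (PySem.List.pyRange 0 6 1) with
    | some r => some r
    | none => check_loopI input is

def check (input : String) : Int :=
  (check_loopI input (PySem.List.pyRange 2 5 1)).getD 0

-- ===== PORT B =====
def prizeTable : PySem.Dict Int Int :=
  PySem.Dict.ofList [(3, 200), (4, 1000), (5, 4000), (6, 10000), (7, 40000), (8, 200000)]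

-- the 'for x, y in zip(reversed(a), reversed(b))' loop of _suffix_len with its break
def suffixLenGo : List (Char × Char) → Int
  | [] => 0
  | (x, y) :: rest => if x ≠ y then 0 else suffixLenGo rest + 1

def suffixLen (a b : String) : Int :=
  suffixLenGo (a.toList.reverse.zip b.toList.reverse)

-- the 'for num in money_number[2:5]' loop with its early return
def check_alt_go (input : String) : List String → Int
  | [] => 0
  | num :: rest =>
    let n := suffixLen num input
    if n ≥ 3 then PySem.Dict.getD prizeTable n 0
    else check_alt_go input rest

def check_alt (input : String) : Int :=
  if PySem.Str.len input ≠ 8 then 0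
  else check_alt_go input (PySem.List.slice money_number (some 2) (some 5))

-- ===== PRECONDITION & SPEC =====
def Spec_check (input : String) (out : Int) : Prop := out = check_alt input
instance (input : String) (out : Int) : Decidable (Spec_check input out) := by unfold Spec_check; infer_instance

-- ===== CLAIM (what is proved, stated in full; the proofs are below) =====
def Claim_equal_check : Prop := ∀ (input : String), Dom_check input → Spec_check input (check input)

-- ===== LEMMAS AND PROOFS =====

-- One money number against an 8-character input: A's inner j-loop returns exactly
-- B's prize-of-longest-common-suffix value.
set_option maxHeartbeats 1000000 in
lemma perNum (m input : String) (m0 m1 m2 m3 m4 m5 m6 m7 c0 c1 c2 c3 c4 c5 c6 c7 : Char)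
    (hm : m.toList = [m0, m1, m2, m3, m4, m5, m6, m7])
    (hc : input.toList = [c0, c1, c2, c3, c4, c5, c6, c7]) :
    check_loopJ m input [0, 1, 2, 3, 4, 5]
      = if suffixLen m input ≥ 3 then some (PySem.Dict.getD prizeTable (suffixLen m input) 0) else none := by
  have hs : suffixLen m input = suffixLenGo [(m7,c7),(m6,c6),(m5,c5),(m4,c4),(m3,c3),(m2,c2),(m1,c1),(m0,c0)] := by
    simp [suffixLen, hm, hc, List.zip]
  have e0 : (PySem.Str.slice m (some 0) none = PySem.Str.slice input (some 0) none) ↔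
      (m0 = c0 ∧ m1 = c1 ∧ m2 = c2 ∧ m3 = c3 ∧ m4 = c4 ∧ m5 = c5 ∧ m6 = c6 ∧ m7 = c7) := by
    rw [String.ext_iff]; simp [pysem, hm, hc]
  have e1 : (PySem.Str.slice m (some 1) none = PySem.Str.slice input (some 1) none) ↔
      (m1 = c1 ∧ m2 = c2 ∧ m3 = c3 ∧ m4 = c4 ∧ m5 = c5 ∧ m6 = c6 ∧ m7 = c7) := by
    rw [String.ext_iff]; simp [pysem, hm, hc]
  have e2 : (PySem.Str.slice m (some 2) none = PySem.Str.slice input (some 2) none) ↔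
      (m2 = c2 ∧ m3 = c3 ∧ m4 = c4 ∧ m5 = c5 ∧ m6 = c6 ∧ m7 = c7) := by
    rw [String.ext_iff]; simp [pysem, hm, hc]
  have e3 : (PySem.Str.slice m (some 3) none = PySem.Str.slice input (some 3) none) ↔
      (m3 = c3 ∧ m4 = c4 ∧ m5 = c5 ∧ m6 = c6 ∧ m7 = c7) := by
    rw [String.ext_iff]; simp [pysem, hm, hc]
  have e4 : (PySem.Str.slice m (some 4) none = PySem.Str.slice input (some 4) none) ↔
      (m4 = c4 ∧ m5 = c5 ∧ m6 = c6 ∧ m7 = c7) := by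
    rw [String.ext_iff]; simp [pysem, hm, hc]
  have e5 : (PySem.Str.slice m (some 5) none = PySem.Str.slice input (some 5) none) ↔
      (m5 = c5 ∧ m6 = c6 ∧ m7 = c7) := by
    rw [String.ext_iff]; simp [pysem, hm, hc]
  rw [hs]
  simp only [check_loopJ, e0, e1, e2, e3, e4, e5]
  by_cases h7 : m7 = c7
  · subst h7
    by_cases h6 : m6 = c6
    · subst h6
      by_cases h5 : m5 = c5
      · subst h5
        by_cases h4 : m4 = c4
        · subst h4
          by_cases h3 : m3 = c3
          · subst h3
            by_cases h2 : m2 = c2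
            · subst h2
              by_cases h1 : m1 = c1
              · subst h1
                by_cases h0 : m0 = c0
                · subst h0
                  simp [suffixLenGo]; decide
                · simp [suffixLenGo, h0]; decide
              · simp [suffixLenGo, h1]; decide
            · simp [suffixLenGo, h2]; decide
          · simp [suffixLenGo, h3]; decide
        · simp [suffixLenGo, h4]; decide
      · simp [suffixLenGo, h5]
    · simp [suffixLenGo, h6]
  · simp [suffixLenGo, h7]

-- When the input does not have 8 characters no slice comparison against an
-- 8-character number can succeed (the lengths differ), so A's j-loop falls through.
lemma loopJ_none (m input : String) (hm : m.toList.length = 8)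
    (hn : input.toList.length ≠ 8) :
    check_loopJ m input [0, 1, 2, 3, 4, 5] = none := by
  have hne : ∀ k : Nat, k ≤ 5 →
      ¬(PySem.Str.slice m (some (k : Int)) none = PySem.Str.slice input (some (k : Int)) none) := by
    intro k hk hEq
    rw [String.ext_iff] at hEq
    have hEq' : m.toList.drop k = input.toList.drop k := by
      simpa [pysem, PySem.List.slice_from_natCast] using hEq
    have hlen2 := congrArg List.length hEq'
    simp only [List.length_drop] at hlen2
    omega
  have h0 := hne 0 (by omega); have h1 := hne 1 (by omega); have h2 := hne 2 (by omega)
  have h3 := hne 3 (by omega); have h4 := hne 4 (by omega); have h5 := hne 5 (by omega)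
  push_cast at h0 h1 h2 h3 h4 h5
  simp [check_loopJ, h0, h1, h2, h3, h4, h5]

lemma exists8 (l : List Char) (hl : l.length = 8) :
    ∃ a b c d e f g h, l = [a, b, c, d, e, f, g, h] := by
  rcases l with _ | ⟨a, l⟩; · simp at hl
  rcases l with _ | ⟨b, l⟩; · simp at hl
  rcases l with _ | ⟨c, l⟩; · simp at hl
  rcases l with _ | ⟨d, l⟩; · simp at hl
  rcases l with _ | ⟨e, l⟩; · simp at hl
  rcases l with _ | ⟨f, l⟩; · simp at hl
  rcases l with _ | ⟨g, l⟩; · simp at hl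
  rcases l with _ | ⟨h, l⟩; · simp at hl
  rcases l with _ | ⟨i, l⟩
  · exact ⟨a, b, c, d, e, f, g, h, rfl⟩
  · simp at hl

lemma check_eq_check_alt (input : String) : check input = check_alt input := by
  by_cases hlen : input.toList.length = 8
  · obtain ⟨c0, c1, c2, c3, c4, c5, c6, c7, hc⟩ := exists8 input.toList hlen
    have hR6 : PySem.List.pyRange 0 6 1 = [0, 1, 2, 3, 4, 5] := by decide
    have hg2 : PySem.List.pyGetD money_number 2 "" = "09505831" := by decide
    have hg3 : PySem.List.pyGetD money_number 3 "" = "54219897" := by decide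
    have hg4 : PySem.List.pyGetD money_number 4 "" = "17469638" := by decide
    have hlen8 : ¬(PySem.Str.len input ≠ 8) := by
      simp [PySem.Str.len_eq, hlen]
    have hsl : PySem.List.slice money_number (some 2) (some 5)
        = ["09505831", "54219897", "17469638"] := by decide
    have p2 := perNum "09505831" input '0' '9' '5' '0' '5' '8' '3' '1'
      c0 c1 c2 c3 c4 c5 c6 c7 (by decide) hc
    have p3 := perNum "54219897" input '5' '4' '2' '1' '9' '8' '9' '7'
      c0 c1 c2 c3 c4 c5 c6 c7 (by decide) hc
    have p4 := perNum "17469638" input '1' '7' '4' '6' '9' '6' '3' '8'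
      c0 c1 c2 c3 c4 c5 c6 c7 (by decide) hc
    have hR25 : PySem.List.pyRange 2 5 1 = [2, 3, 4] := by decide
    rw [check, check_alt, hR25, if_neg hlen8, hsl]
    simp only [check_loopI, hg2, hg3, hg4, hR6, p2, p3, p4, check_alt_go]
    by_cases s2 : suffixLen "09505831" input ≥ 3
    · simp [s2]
    · by_cases s3 : suffixLen "54219897" input ≥ 3
      · simp [s2, s3]
      · by_cases s4 : suffixLen "17469638" input ≥ 3
        · simp [s2, s3, s4]
        · simp [s2, s3, s4]
  · have hR25 : PySem.List.pyRange 2 5 1 = [2, 3, 4] := by decide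
    have hR6 : PySem.List.pyRange 0 6 1 = [0, 1, 2, 3, 4, 5] := by decide
    have hg2 : PySem.List.pyGetD money_number 2 "" = "09505831" := by decide
    have hg3 : PySem.List.pyGetD money_number 3 "" = "54219897" := by decide
    have hg4 : PySem.List.pyGetD money_number 4 "" = "17469638" := by decide
    have n2 := loopJ_none "09505831" input (by decide) hlen
    have n3 := loopJ_none "54219897" input (by decide) hlen
    have n4 := loopJ_none "17469638" input (by decide) hlen
    have hlen8 : PySem.Str.len input ≠ 8 := by
      rw [PySem.Str.len_eq]; omega
    rw [check, check_alt, hR25, if_pos hlen8]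
    simp only [check_loopI, hg2, hg3, hg4, hR6, n2, n3, n4]
    rfl

-- ===== VERDICT (by name: the statement is the Claim_ definition above) =====
theorem check_spec : Claim_equal_check := by
  intro input _
  unfold Spec_check
  exact check_eq_check_alt input
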